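-- pv_equiv track=rewrite | github.com/bettersg/SchemesSG_v3 | backend/functions/new_scheme/pipeline_runner.py | map_to_valid_values
-- ===== SOURCE A (Python) =====
-- from typing import Optional, Tuple, Dict, Any, List
--
-- def map_to_valid_values(llm_values: Optional[List[str]], valid_options: List[str]) -> List[str]:
--     """Map LLM output values to valid options using keyword matching."""
--     if not llm_values:
--         return []
--
--     stop_words = {"and", "or", "the", "a", "an", "for", "of", "in", "to", "with"}
--
--     def get_keywords(text: str) -> set:
--         words = text.lower().replace("/", " ").replace("-", " ").split()
--         return {w for w in words if w not in stop_words and len(w) > 2}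
--
--     mapped = []
--     for llm_val in llm_values:
--         llm_lower = llm_val.lower().strip()
--         llm_keywords = get_keywords(llm_val)
--
--         # Try exact match first
--         for opt in valid_options:
--             if llm_lower == opt.lower():
--                 mapped.append(opt)
--                 break
--         else:
--             # Try keyword overlap
--             for opt in valid_options:
--                 opt_keywords = get_keywords(opt)
--                 if llm_keywords & opt_keywords:
--                     mapped.append(opt)
--                     break
--
--     return list(dict.fromkeys(mapped))  # Remove duplicates, preserve order
-- ===== SOURCE B (Python) =====
-- from typing import Optional, List
--
--
-- def map_to_valid_values(llm_values: Optional[List[str]], valid_options: List[str]) -> List[str]: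
--     """Map LLM output values to valid options via a precomputed exact-match dict
--     and an inverted keyword -> first-option-index map (single pass over options)."""
--     if not llm_values:
--         return []
--
--     stop_words = {"and", "or", "the", "a", "an", "for", "of", "in", "to", "with"}
--
--     def get_keywords(text: str) -> set:
--         words = text.lower().replace("/", " ").replace("-", " ").split()
--         return {w for w in words if w not in stop_words and len(w) > 2}
--
--     exact = {}       # lower(option) -> first option with that lowering
--     kw_first = {}    # keyword -> index of first option containing it
--     for i, opt in enumerate(valid_options):
--         exact.setdefault(opt.lower(), opt)
--         for w in get_keywords(opt):
--             kw_first.setdefault(w, i)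
--
--     mapped = []
--     for llm_val in llm_values:
--         llm_lower = llm_val.lower().strip()
--         if llm_lower in exact:
--             mapped.append(exact[llm_lower])
--         else:
--             idxs = [kw_first[w] for w in get_keywords(llm_val) if w in kw_first]
--             if idxs:
--                 mapped.append(valid_options[min(idxs)])
--
--     return list(dict.fromkeys(mapped))
-- ===== Notes on version B (the rewrite author's own statement) =====
-- stated objective: faster
-- what changed: Instead of rescanning all valid options (exact pass then keyword-overlap pass) for every LLM value, B makes one pass over the options building a lowercase exact-match dict and an inverted keyword->first-option-index map, then resolves each LLM value by dict lookup / min index over its keywords.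
import Mathlib
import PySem

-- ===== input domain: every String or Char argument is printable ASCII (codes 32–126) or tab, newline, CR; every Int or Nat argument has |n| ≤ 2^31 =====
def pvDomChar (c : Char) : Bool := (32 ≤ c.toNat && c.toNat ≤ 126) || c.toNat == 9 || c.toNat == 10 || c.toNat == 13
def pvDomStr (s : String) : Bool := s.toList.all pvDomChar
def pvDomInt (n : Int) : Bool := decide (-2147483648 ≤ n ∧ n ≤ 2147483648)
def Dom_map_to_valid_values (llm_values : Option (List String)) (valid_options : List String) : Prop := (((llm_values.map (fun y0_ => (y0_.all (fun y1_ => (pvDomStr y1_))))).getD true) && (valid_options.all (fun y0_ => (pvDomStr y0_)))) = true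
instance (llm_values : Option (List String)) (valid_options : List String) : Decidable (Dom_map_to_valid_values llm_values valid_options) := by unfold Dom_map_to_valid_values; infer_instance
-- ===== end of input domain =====

-- ===== PORT A =====
-- B replaces A's per-value scans over valid_options by a precomputed exact-match dict
-- and an inverted keyword -> first-option-index map (objective: faster, asymptotic).

def pvStopWords : List String := ["and", "or", "the", "a", "an", "for", "of", "in", "to", "with"]

-- get_keywords (identical helper in Source A and Source B): lower, '/'->' ', '-'->' ', split, set-filter
def pvGetKeywords (text : String) : PySem.Set String :=
  let words := PySem.Str.split₀ (PySem.Str.replace (PySem.Str.replace (PySem.Str.lower text) "/" " ") "-" " ")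
  PySem.Set.ofList (words.filter (fun w => !pvStopWords.contains w && PySem.Str.len w > 2))

def map_to_valid_values (llm_values : Option (List String)) (valid_options : List String) : List String :=
  match llm_values with
  | none => []
  | some l =>
    if l.isEmpty then [] else
    let mapped := l.foldl (fun mapped llm_val =>
      let llm_lower := PySem.Str.strip (PySem.Str.lower llm_val)
      let llm_keywords := pvGetKeywords llm_val
      -- exact-match scan (for … break / else)
      match valid_options.find? (fun opt => llm_lower == PySem.Str.lower opt) with
      | some opt => mapped ++ [opt]
      | none =>
        -- keyword-overlap scan
        match valid_options.find? (fun opt => !(PySem.Set.inter llm_keywords (pvGetKeywords opt)).isEmpty) with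
        | some opt => mapped ++ [opt]
        | none => mapped) []
    PySem.List.dedup mapped

-- ===== PORT B =====
def map_to_valid_values_alt (llm_values : Option (List String)) (valid_options : List String) : List String :=
  match llm_values with
  | none => []
  | some l =>
    if l.isEmpty then [] else
    -- one pass over valid_options: state = (exact, kw_first, i)
    let st := valid_options.foldl
      (fun (st : PySem.Dict String String × PySem.Dict String Nat × Nat) opt =>
        (st.1.setdefault (PySem.Str.lower opt) opt,
         (pvGetKeywords opt).foldl (fun d w => d.setdefault w st.2.2) st.2.1,
         st.2.2 + 1))
      (PySem.Dict.empty, PySem.Dict.empty, 0)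
    let exact := st.1
    let kw_first := st.2.1
    let mapped := l.foldl (fun mapped llm_val =>
      let llm_lower := PySem.Str.strip (PySem.Str.lower llm_val)
      match exact.get? llm_lower with
      | some o => mapped ++ [o]
      | none =>
        let idxs := (pvGetKeywords llm_val).filterMap (fun w => kw_first.get? w)
        match idxs.min? with
        | some i => mapped ++ [valid_options.getD i ""]  -- valid_options[min(idxs)], always in range
        | none => mapped) []
    PySem.List.dedup mapped

-- ===== PRECONDITION & SPEC =====
def Spec_map_to_valid_values (llm_values : Option (List String)) (valid_options : List String) (out : List String) : Prop := out = map_to_valid_values_alt llm_values valid_options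
instance (llm_values : Option (List String)) (valid_options : List String) (out : List String) : Decidable (Spec_map_to_valid_values llm_values valid_options out) := by unfold Spec_map_to_valid_values; infer_instance

-- ===== CLAIM (what is proved, stated in full; the proofs are below) =====
def Claim_equal_map_to_valid_values : Prop := ∀ (llm_values : Option (List String)) (valid_options : List String), Dom_map_to_valid_values llm_values valid_options → Spec_map_to_valid_values llm_values valid_options (map_to_valid_values llm_values valid_options)

-- ===== LEMMAS AND PROOFS =====

-- the inverted-index half of B's single pass, in isolation
def pvKwFold (vs : List String) (p : PySem.Dict String Nat × Nat) : PySem.Dict String Nat × Nat :=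
  vs.foldl (fun p opt => ((pvGetKeywords opt).foldl (fun d w => d.setdefault w p.2) p.1, p.2 + 1)) p

-- B's triple fold splits into the exact-dict fold and pvKwFold
theorem pv_fold_split (vs : List String) (a : PySem.Dict String String) (b : PySem.Dict String Nat) (n : Nat) :
    vs.foldl (fun (st : PySem.Dict String String × PySem.Dict String Nat × Nat) opt =>
        (st.1.setdefault (PySem.Str.lower opt) opt,
         (pvGetKeywords opt).foldl (fun d w => d.setdefault w st.2.2) st.2.1,
         st.2.2 + 1)) (a, b, n)
      = (vs.foldl (fun d opt => d.setdefault (PySem.Str.lower opt) opt) a, pvKwFold vs (b, n)) := by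
  induction vs generalizing a b n with
  | nil => rfl
  | cons o vs ih => simp only [List.foldl_cons, pvKwFold] at *; exact ih _ _ _

theorem pv_exact_get (vs : List String) (d : PySem.Dict String String) (q : String) :
    (vs.foldl (fun d opt => d.setdefault (PySem.Str.lower opt) opt) d).get? q
      = (d.get? q).or (vs.find? (fun opt => q == PySem.Str.lower opt)) := by
  induction vs generalizing d with
  | nil => cases hd : d.get? q <;> simp [hd]
  | cons o vs ih =>
    simp only [List.foldl_cons, List.find?_cons, ih]
    by_cases h : q = PySem.Str.lower o
    · subst h
      rw [PySem.Dict.get?_setdefault_self]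
      simp only [beq_self_eq_true, if_pos]
      cases hd : d.get? (PySem.Str.lower o) <;> simp [Option.getD]
    · rw [PySem.Dict.get?_setdefault_of_ne _ _ h]
      have hb : (q == PySem.Str.lower o) = false := by simp [h]
      simp [hb]

theorem pv_inner_get (ws : List String) (d : PySem.Dict String Nat) (i : Nat) (q : String) :
    (ws.foldl (fun d w => d.setdefault w i) d).get? q
      = (d.get? q).or (if ws.contains q then some i else none) := by
  induction ws generalizing d with
  | nil => cases hd : d.get? q <;> simp [hd]
  | cons w ws ih =>
    simp only [List.foldl_cons, ih]
    by_cases h : q = w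
    · subst h
      rw [PySem.Dict.get?_setdefault_self]
      simp only [List.contains_cons, beq_self_eq_true, Bool.true_or, if_pos]
      cases hd : d.get? q <;> simp [Option.getD]
    · rw [PySem.Dict.get?_setdefault_of_ne _ _ h]
      simp [h]

theorem pv_kw_get (vs : List String) (d : PySem.Dict String Nat) (n : Nat) (q : String) :
    (pvKwFold vs (d, n)).1.get? q
      = (d.get? q).or ((List.findIdx? (fun o => (pvGetKeywords o).contains q) vs).map (· + n)) := by
  induction vs generalizing d n with
  | nil => cases hd : d.get? q <;> simp [pvKwFold, hd]
  | cons o vs ih =>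
    simp only [pvKwFold, List.foldl_cons]
    rw [show (List.foldl (fun p opt => ((pvGetKeywords opt).foldl (fun d w => d.setdefault w p.2) p.1, p.2 + 1))
        ((pvGetKeywords o).foldl (fun d w => d.setdefault w n) d, n + 1) vs) = pvKwFold vs ((pvGetKeywords o).foldl (fun d w => d.setdefault w n) d, n + 1) from rfl]
    rw [ih, pv_inner_get, List.findIdx?_cons, Option.or_assoc]
    by_cases hm : q ∈ pvGetKeywords o
    · simp [hm]
    · have h' : ((pvGetKeywords o).contains q) = false := by simpa using hm
      simp only [h', Bool.false_eq_true, if_false]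
      rw [Option.map_map, show ((fun x => x + n) ∘ fun i => i + 1) = (fun x => x + (n + 1)) from funext fun i => by simp [Function.comp]; omega]
      simp [hm]

theorem pv_filterMap_map {α β γ : Type} (l : List α) (g : α → Option β) (f : β → γ) :
    l.filterMap (fun w => (g w).map f) = (l.filterMap g).map f := by
  induction l with
  | nil => rfl
  | cons w l ih => cases h : g w <;> simp [List.filterMap_cons, h, ih]

theorem pv_min?_map_succ (l : List Nat) : (l.map (· + 1)).min? = l.min?.map (· + 1) := by
  induction l with
  | nil => rfl
  | cons a l ih =>
    simp only [List.map_cons, List.min?_cons, ih]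
    cases h : l.min? <;> simp [Option.elim, Nat.succ_min_succ]

theorem pv_min?_zero (l : List Nat) (h : 0 ∈ l) : l.min? = some 0 := by
  cases hm : l.min? with
  | none =>
    rw [List.min?_eq_none_iff] at hm
    subst hm; simp at h
  | some m =>
    rw [List.min?_eq_some_iff] at hm
    have := hm.2 0 h
    simp only [Option.some.injEq]
    omega

-- the crux: min over keyword first-indices = index of the first overlapping option
theorem pv_min_idx (k : List String) (vs : List String) :
    (k.filterMap (fun w => List.findIdx? (fun o => (pvGetKeywords o).contains w) vs)).min?
      = List.findIdx? (fun o => !(PySem.Set.inter k (pvGetKeywords o)).isEmpty) vs := by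
  induction vs with
  | nil => simp [List.findIdx?_nil, List.filterMap_eq_nil_iff]
  | cons o vs ih =>
    by_cases h : ∃ w ∈ k, (pvGetKeywords o).contains w
    · obtain ⟨w, hw, hc⟩ := h
      have hne : (PySem.Set.inter k (pvGetKeywords o)).isEmpty = false := by
        rw [Bool.eq_false_iff]
        intro he
        rw [List.isEmpty_iff] at he
        have : w ∈ PySem.Set.inter k (pvGetKeywords o) := by
          rw [PySem.Set.mem_inter]
          exact ⟨hw, by simpa using hc⟩
        simp [he] at this
      rw [List.findIdx?_cons, hne]
      simp only [Bool.not_false, if_pos rfl]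
      apply pv_min?_zero
      rw [List.mem_filterMap]
      exact ⟨w, hw, by rw [List.findIdx?_cons, hc]; rfl⟩
    · push_neg at h
      have he : (PySem.Set.inter k (pvGetKeywords o)).isEmpty = true := by
        rw [List.isEmpty_iff, List.eq_nil_iff_forall_not_mem]
        intro w hwmem
        rw [PySem.Set.mem_inter] at hwmem
        exact h w hwmem.1 (by simpa using hwmem.2)
      rw [List.findIdx?_cons, he]
      simp only [Bool.not_true, Bool.false_eq_true, if_false]
      have hcong : k.filterMap (fun w => List.findIdx? (fun o => (pvGetKeywords o).contains w) (o :: vs))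
          = k.filterMap (fun w => (List.findIdx? (fun o => (pvGetKeywords o).contains w) vs).map (· + 1)) := by
        apply List.filterMap_congr
        intro w hw
        rw [List.findIdx?_cons]
        have hcw : w ∉ pvGetKeywords o := by simpa using h w hw
        simp [hcw]
      rw [hcong, pv_filterMap_map, pv_min?_map_succ, ih]

theorem pv_pick (vs : List String) (p : String → Bool) :
    (List.findIdx? p vs).map (fun i => vs.getD i "") = vs.find? p := by
  induction vs with
  | nil => rfl
  | cons o vs ih =>
    rw [List.findIdx?_cons, List.find?_cons]
    by_cases h : p o
    · simp [h]
    · have h' : p o = false := by simpa using h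
      rw [h']
      simp only [Bool.false_eq_true, if_false, cond_false, Option.map_map, ← ih]
      congr 1

-- ===== VERDICT (by name: the statement is the Claim_ definition above) =====
theorem map_to_valid_values_spec : Claim_equal_map_to_valid_values := by
  intro llm_values valid_options _
  unfold Spec_map_to_valid_values map_to_valid_values map_to_valid_values_alt
  cases llm_values with
  | none => rfl
  | some l =>
    simp only
    by_cases hl : l.isEmpty
    · simp [hl]
    · simp only [hl, Bool.false_eq_true, if_false]
      congr 1
      apply List.foldl_ext
      intro mapped llm_val _
      simp only [pv_fold_split]
      rw [pv_exact_get]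
      simp only [PySem.Dict.get?_empty, Option.none_or]
      cases hfind : valid_options.find? (fun opt => PySem.Str.strip (PySem.Str.lower llm_val) == PySem.Str.lower opt) with
      | some o => rfl
      | none =>
        simp only
        have hk : ((pvGetKeywords llm_val).filterMap (fun w => (pvKwFold valid_options (PySem.Dict.empty, 0)).1.get? w)).min?
            = List.findIdx? (fun o => !(PySem.Set.inter (pvGetKeywords llm_val) (pvGetKeywords o)).isEmpty) valid_options := by
          rw [← pv_min_idx]
          refine congrArg List.min? (List.filterMap_congr ?_)
          intro w _
          rw [pv_kw_get]
          simp [PySem.Dict.get?_empty, Option.map_id']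
        rw [hk]
        rw [← pv_pick valid_options (fun o => !(PySem.Set.inter (pvGetKeywords llm_val) (pvGetKeywords o)).isEmpty)]
        cases List.findIdx? (fun o => !(PySem.Set.inter (pvGetKeywords llm_val) (pvGetKeywords o)).isEmpty) valid_options <;> rfl
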